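-- pv_equiv track=rewrite | github.com/wulfebw/algorithms | scripts/recursion/recursive_backtracking_impl.py | cubic_decomp
-- ===== SOURCE A (Python) =====
-- def cubic_decomp(n):
--     '''
--     complexity?
--     the recursion is like T(n) = T(n-1) + T(n-2) + T(n-3) + ...
--     = sum i = n-1 to 1 T(i)
--     so definitely exponential
--     but it just so happens that most numbers are decomposed easily I guess
--     '''
--
--     def recurse(r, n, max_terms):
--         if r == 0: return True, []
--         if max_terms <= 0: return False, []
--         if r < 0: return False, []
--         for i in range(n - 1, 0, -1):
--             res, terms = recurse(r - i ** 3, i, max_terms - 1)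
--             if res:
--                 return True, terms + [i]
--         return False, []
--
--     return recurse(n ** 3, n, 10)
-- ===== SOURCE B (Python) =====
-- def cubic_decomp(n):
--     # Memoized (dynamic-programming) variant: same first-found DFS value,
--     # but each (remainder, bound, budget) state is solved at most once.
--     cache = {}
--
--     def solve(r, bound, k):
--         if r == 0:
--             return True, []
--         if k == 0 or r < 0:
--             return False, []
--         key = (r, bound, k)
--         if key in cache:
--             return cache[key]
--         res = (False, [])
--         for i in range(bound - 1, 0, -1):
--             ok, terms = solve(r - i ** 3, i, k - 1)
--             if ok:
--                 res = (True, terms + [i])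
--                 break
--         cache[key] = res
--         return res
--
--     return solve(n ** 3, n, 10)
-- ===== Notes on version B (the rewrite author's own statement) =====
-- stated objective: alternative
-- what changed: Replaced the naive exponential backtracking with memoized recursion (dynamic programming): a cache keyed by (remainder, bound, budget) solves each search state at most once, instead of re-exploring identical subtrees.
import Mathlib
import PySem

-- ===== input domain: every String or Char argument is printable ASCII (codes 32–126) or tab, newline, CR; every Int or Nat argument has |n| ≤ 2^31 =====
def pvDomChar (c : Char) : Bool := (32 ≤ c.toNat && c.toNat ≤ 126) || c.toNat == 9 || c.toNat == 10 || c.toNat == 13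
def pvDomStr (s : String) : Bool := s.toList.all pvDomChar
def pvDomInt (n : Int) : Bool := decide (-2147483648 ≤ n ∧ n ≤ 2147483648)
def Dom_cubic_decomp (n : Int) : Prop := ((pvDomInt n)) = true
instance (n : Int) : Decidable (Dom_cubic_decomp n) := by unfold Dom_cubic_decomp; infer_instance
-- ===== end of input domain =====

-- B replaces A's naive backtracking with memoized recursion on (remainder, bound, budget):
-- a genuinely different (dynamic-programming) evaluation of the same search, proved to return the same value.


-- ===== PORT A =====
-- A's inner `recurse(r, n, max_terms)`: max_terms starts at the literal 10 and only ever
-- decreases by 1 per call, so it is carried as a Nat fuel; `max_terms <= 0` is exactly `fuel = 0`.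
mutual
def recurseA (fuel : Nat) (r n : Int) : Bool × List Int :=
  if r = 0 then (true, [])
  else match fuel with
    | 0 => (false, [])
    | f + 1 =>
      if r < 0 then (false, [])
      else goA f r (PySem.List.pyRange (n - 1) 0 (-1))
  termination_by (fuel, 0)

-- the `for i in range(n-1, 0, -1)` loop with its early `return True, terms + [i]`
def goA (f : Nat) (r : Int) : List Int → Bool × List Int
  | [] => (false, [])
  | i :: rest =>
    let p := recurseA f (r - i ^ 3) i
    if p.1 then (true, p.2 ++ [i]) else goA f r rest
  termination_by l => (f, l.length + 1)
end

def cubic_decomp (n : Int) : Bool × List Int := recurseA 10 (n ^ 3) n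

-- ===== PORT B =====
-- B threads the Python `cache` dict through the recursion as explicit state.
mutual
def solveB (k : Nat) (r b : Int) (c : PySem.Dict (Int × Int × Nat) (Bool × List Int)) :
    (Bool × List Int) × PySem.Dict (Int × Int × Nat) (Bool × List Int) :=
  if r = 0 then ((true, []), c)
  else match k with
    | 0 => ((false, []), c)
    | f + 1 =>
      if r < 0 then ((false, []), c)
      else match PySem.Dict.get? c (r, b, f + 1) with
        | some v => (v, c)
        | none =>
          let p := loopB f r (PySem.List.pyRange (b - 1) 0 (-1)) c
          (p.1, PySem.Dict.insert p.2 (r, b, f + 1) p.1)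
  termination_by (k, 0)

-- B's `for` loop with `break`; returns the loop's `res` together with the updated cache
def loopB (f : Nat) (r : Int) :
    List Int → PySem.Dict (Int × Int × Nat) (Bool × List Int) →
    (Bool × List Int) × PySem.Dict (Int × Int × Nat) (Bool × List Int)
  | [], c => ((false, []), c)
  | i :: rest, c =>
    let q := solveB f (r - i ^ 3) i c
    if q.1.1 then ((true, q.1.2 ++ [i]), q.2) else loopB f r rest q.2
  termination_by l _ => (f, l.length + 1)
end

def cubic_decomp_alt (n : Int) : Bool × List Int :=
  (solveB 10 (n ^ 3) n PySem.Dict.empty).1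

-- ===== PRECONDITION & SPEC =====
def Spec_cubic_decomp (n : Int) (out : Bool × List Int) : Prop := out = cubic_decomp_alt n
instance (n : Int) (out : Bool × List Int) : Decidable (Spec_cubic_decomp n out) := by unfold Spec_cubic_decomp; infer_instance

-- ===== CLAIM (what is proved, stated in full; the proofs are below) =====
def Claim_equal_cubic_decomp : Prop := ∀ (n : Int), Dom_cubic_decomp n → Spec_cubic_decomp n (cubic_decomp n)

-- ===== LEMMAS AND PROOFS =====

-- cache invariant: every stored entry is the corresponding value of A's recursion
def GoodC (c : PySem.Dict (Int × Int × Nat) (Bool × List Int)) : Prop :=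
  ∀ (r b : Int) (k : Nat) (v : Bool × List Int),
    PySem.Dict.get? c (r, b, k) = some v → v = recurseA k r b

theorem goodC_empty : GoodC PySem.Dict.empty := by
  intro r b k v h
  simp [PySem.Dict.get?_empty] at h

theorem loopB_correct (f : Nat)
    (IH : ∀ (r b : Int) (c : PySem.Dict (Int × Int × Nat) (Bool × List Int)),
      GoodC c → (solveB f r b c).1 = recurseA f r b ∧ GoodC (solveB f r b c).2) :
    ∀ (l : List Int) (r : Int) (c : PySem.Dict (Int × Int × Nat) (Bool × List Int)),
      GoodC c → (loopB f r l c).1 = goA f r l ∧ GoodC (loopB f r l c).2 := by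
  intro l
  induction l with
  | nil => intro r c hc; simp [loopB, goA, hc]
  | cons i rest ih =>
    intro r c hc
    obtain ⟨hval, hgood⟩ := IH (r - i ^ 3) i c hc
    have h1 : (solveB f (r - i ^ 3) i c).1.1 = (recurseA f (r - i ^ 3) i).1 := by rw [hval]
    by_cases hres : (recurseA f (r - i ^ 3) i).1 = true
    · constructor
      · simp [loopB, goA, hres, hval]
      · simpa [loopB, h1, hres] using hgood
    · obtain ⟨hv2, hg2⟩ := ih r (solveB f (r - i ^ 3) i c).2 hgood
      constructor
      · simp [loopB, goA, h1, hres, hv2]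
      · simpa [loopB, h1, hres] using hg2

theorem solveB_correct :
    ∀ (k : Nat) (r b : Int) (c : PySem.Dict (Int × Int × Nat) (Bool × List Int)),
      GoodC c → (solveB k r b c).1 = recurseA k r b ∧ GoodC (solveB k r b c).2 := by
  intro k
  induction k with
  | zero =>
    intro r b c hc
    by_cases hr : r = 0 <;> simp [solveB, recurseA, hr, hc]
  | succ f IH =>
    intro r b c hc
    by_cases hr : r = 0
    · simp [solveB, recurseA, hr, hc]
    · by_cases hneg : r < 0
      · simp [solveB, recurseA, hr, hneg, hc]
      · rw [solveB, recurseA]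
        simp only [if_neg hr, if_neg hneg]
        cases hget : PySem.Dict.get? c (r, b, f + 1) with
        | some v =>
          have hv := hc r b (f + 1) v hget
          rw [recurseA] at hv
          simp only [if_neg hr, if_neg hneg] at hv
          simpa [hget] using ⟨hv, hc⟩
        | none =>
          obtain ⟨hval, hgood⟩ :=
            loopB_correct f IH (PySem.List.pyRange (b - 1) 0 (-1)) r c hc
          refine ⟨hval, ?_⟩
          intro r' b' k' v' h
          rw [PySem.Dict.get?_insert] at h
          by_cases hk : (r', b', k') = ((r, b, f + 1) : Int × Int × Nat)
          · rw [if_pos hk] at h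
            -- the stored value is the loop result, which is recurseA (f+1) r b
            obtain ⟨e1, e2, e3⟩ : r' = r ∧ b' = b ∧ k' = f + 1 := by
              simpa [Prod.ext_iff] using hk
            subst e1; subst e2; subst e3
            have h' := Option.some.inj h
            rw [← h', hval, recurseA]
            simp [hr, hneg]
          · rw [if_neg hk] at h
            exact hgood r' b' k' v' h

-- ===== VERDICT (by name: the statement is the Claim_ definition above) =====
theorem cubic_decomp_spec : Claim_equal_cubic_decomp := by
  intro n _
  unfold Spec_cubic_decomp cubic_decomp cubic_decomp_alt
  exact ((solveB_correct 10 (n ^ 3) n PySem.Dict.empty goodC_empty).1).symm
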